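-- pv_equiv track=rewrite | github.com/maxmaxmax512/JupyterNotebooks | Learning Dice Functions.py | countdice
-- ===== SOURCE A (Python) =====
-- def order_dict(x):
--     keys=list(x.keys())
--     keys.sort()
--     sorted_dict = {}
--     for i in keys:
--         sorted_dict[i]=x[i]
--     return sorted_dict
--
-- def countdice(x):
--     count = {}
--     for i in x:
--         if i in count.keys():
--             count[i]=count[i]+1
--         else:
--             count[i]=1
--     sorted_count=order_dict(count)
--     return sorted_count
-- ===== SOURCE B (Python) =====
-- def countdice(x):
--     # Sort first, then one run-length scan over the sorted copy: each run of
--     # equal values becomes one key with its length; keys come out sorted for free.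
--     result = {}
--     s = sorted(x)
--     if not s:
--         return result
--     cur = s[0]
--     cnt = 1
--     for v in s[1:]:
--         if v == cur:
--             cnt += 1
--         else:
--             result[cur] = cnt
--             cur = v
--             cnt = 1
--     result[cur] = cnt
--     return result
-- ===== Notes on version B (the rewrite author's own statement) =====
-- stated objective: faster
-- what changed: Replaces the dict-count pass followed by a key-sort-and-rebuild pass with a single run-length scan over sorted(x) that emits each (value, run length) group in key order directly.
import Mathlib
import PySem

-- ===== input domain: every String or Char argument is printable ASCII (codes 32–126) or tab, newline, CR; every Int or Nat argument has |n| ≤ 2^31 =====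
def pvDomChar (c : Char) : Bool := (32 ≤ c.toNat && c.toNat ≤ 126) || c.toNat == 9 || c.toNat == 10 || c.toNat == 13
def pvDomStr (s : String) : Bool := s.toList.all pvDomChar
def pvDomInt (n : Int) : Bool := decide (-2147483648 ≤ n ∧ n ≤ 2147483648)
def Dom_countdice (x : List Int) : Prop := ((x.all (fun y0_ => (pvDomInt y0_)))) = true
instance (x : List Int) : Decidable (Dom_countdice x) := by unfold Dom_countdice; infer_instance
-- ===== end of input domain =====

-- B replaces A's hash-count-then-sort-keys-and-rebuild with one run-length scan over sorted(x); measured faster by a constant factor.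

-- ===== PORT A =====
-- order_dict: sort the keys, rebuild a dict in that order.  x[i] is always present
-- (i comes from x.keys()), so getD with any default is exact here.
def pvOrderDict (x : PySem.Dict Int Int) : List (Int × Int) :=
  -- keys = sorted(x.keys()); then rebuild sorted_dict in that order
  ((PySem.List.sorted x.keys (fun k => k)).foldl
    (fun sd i => sd.insert i (x.getD i 0)) PySem.Dict.empty).items

def countdice (x : List Int) : List (Int × Int) :=
  -- count = the dict built by the membership-tested counting loop
  pvOrderDict (x.foldl
    (fun d i => if d.contains i then d.insert i (d.getD i 0 + 1) else d.insert i 1)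
    PySem.Dict.empty)

-- ===== PORT B =====
-- run-length scan over sorted(x): state = (result dict, current value, running count)
def countdice_alt (x : List Int) : List (Int × Int) :=
  let s := PySem.List.sorted x (fun k => k)
  match s with
  | [] => (PySem.Dict.empty (κ := Int) (ν := Int)).items
  | cur0 :: rest =>
    let st := rest.foldl
      (fun (st : PySem.Dict Int Int × Int × Int) v =>
        if v = st.2.1 then (st.1, st.2.1, st.2.2 + 1)
        else (st.1.insert st.2.1 st.2.2, v, 1))
      (PySem.Dict.empty, cur0, 1)
    (st.1.insert st.2.1 st.2.2).items

-- ===== PRECONDITION & SPEC =====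
def Spec_countdice (x : List Int) (out : List (Int × Int)) : Prop := out = countdice_alt x
instance (x : List Int) (out : List (Int × Int)) : Decidable (Spec_countdice x out) := by unfold Spec_countdice; infer_instance

-- ===== CLAIM (what is proved, stated in full; the proofs are below) =====
def Claim_equal_countdice : Prop := ∀ (x : List Int), Dom_countdice x → Spec_countdice x (countdice x)

-- ===== LEMMAS AND PROOFS =====

-- A's counting fold is the standard counter fold (the else-branch inserts 1 = getD+1).
theorem pv_count_fold_eq (x : List Int) :
    x.foldl (fun d i => if d.contains i then d.insert i (d.getD i 0 + 1) else d.insert i 1)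
      PySem.Dict.empty = PySem.Dict.counter x := by
  have hf : (fun (d : PySem.Dict Int Int) i => if d.contains i then d.insert i (d.getD i 0 + 1) else d.insert i 1)
      = fun d i => d.insert i (d.getD i 0 + 1) := by
    funext d i
    by_cases h : d.contains i = true
    · simp [h]
    · simp only [Bool.not_eq_true] at h
      rw [if_neg (by simp [h]), PySem.Dict.getD_of_not_contains d 0 h]
      norm_num
  rw [hf, PySem.Dict.foldl_insert_getD_add_one_eq_counter]

-- ofList is a sublist of its input (elements kept in first-occurrence order).
theorem pv_foldl_add_sublist (l : List Int) : ∀ (s : PySem.Set Int),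
    (l.foldl PySem.Set.add s).Sublist (s ++ l) := by
  induction l with
  | nil => simp
  | cons a l ih =>
    intro s
    have h1 : (s.add a).Sublist (s ++ [a]) := by
      rw [PySem.Set.add_eq_ite]; split
      · exact List.sublist_append_left s [a]
      · exact List.Sublist.refl _
    show (l.foldl PySem.Set.add (s.add a)).Sublist (s ++ a :: l)
    have h2 := (ih (s.add a)).trans (h1.append_right l)
    simpa using h2

theorem pv_ofList_cons_of_not_mem (a : Int) (l : List Int) (h : a ∉ l) :
    PySem.Set.ofList (a :: l) = a :: PySem.Set.ofList l := by
  rw [PySem.Set.ofList_cons]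
  congr 1
  apply List.filter_eq_self.mpr
  intro y hy
  have hya : y ≠ a := fun hya => h (by simpa [hya] using (PySem.Set.mem_ofList l y).mp hy)
  simp [hya]

theorem pv_ofList_cons_dup (a : Int) (l : List Int) :
    PySem.Set.ofList (a :: a :: l) = PySem.Set.ofList (a :: l) := by
  rw [PySem.Set.ofList_cons, PySem.Set.ofList_cons a l]
  simp [PySem.Set.discard, List.filter_filter]

-- A's result in closed form.
theorem pv_A_closed (x : List Int) :
    countdice x = (PySem.List.sorted (PySem.Set.ofList x) (fun k => k)).map
      (fun k => (k, (x.count k : Int))) := by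
  unfold countdice pvOrderDict
  rw [pv_count_fold_eq, PySem.Dict.keys_counter]
  have hnd : (PySem.List.sorted (PySem.Set.ofList x) (fun k => k)).Nodup :=
    (PySem.List.sorted_perm (PySem.Set.ofList x) (fun k => k) false).nodup_iff.mpr
      (PySem.Set.nodup_ofList x)
  rw [PySem.Dict.items_foldl_insert_fresh _ (fun a => a)
      (fun i => (PySem.Dict.counter x).getD i 0) PySem.Dict.empty
      (fun a _ => PySem.Dict.contains_empty a) (by simpa using hnd)]
  have hemp : (PySem.Dict.empty : PySem.Dict Int Int).items = [] := rfl
  rw [hemp, List.nil_append]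
  exact List.map_congr_left (fun k _ => by rw [PySem.Dict.getD_counter])

-- B's loop invariant.
theorem pv_B_loop (t : List Int) : ∀ (d : PySem.Dict Int Int) (cur cnt : Int),
    List.Pairwise (· ≤ ·) (cur :: t) →
    (∀ k ∈ cur :: t, d.contains k = false) →
    (let st := t.foldl
        (fun (st : PySem.Dict Int Int × Int × Int) v =>
          if v = st.2.1 then (st.1, st.2.1, st.2.2 + 1)
          else (st.1.insert st.2.1 st.2.2, v, 1)) (d, cur, cnt);
      (st.1.insert st.2.1 st.2.2).items)
    = d.items ++ (PySem.Set.ofList (cur :: t)).map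
        (fun k => (k, (if k = cur then cnt else 0) + (t.count k : Int))) := by
  induction t with
  | nil =>
    intro d cur cnt _ hd
    simp only [List.foldl_nil]
    rw [PySem.Dict.items_insert_of_not_contains d cnt (hd cur (by simp))]
    simp [PySem.Set.ofList_cons, PySem.Set.ofList_nil, PySem.Set.discard]
  | cons v rest ih =>
    intro d cur cnt hs hd
    rw [List.pairwise_cons] at hs
    by_cases hv : v = cur
    · subst hv
      have hs' : List.Pairwise (· ≤ ·) (v :: rest) := hs.2
      have hd' : ∀ k ∈ v :: rest, d.contains k = false :=
        fun k hk => hd k (List.mem_cons_of_mem v hk)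
      have hih := ih d v (cnt + 1) hs' hd'
      simp only [List.foldl_cons, if_pos trivial]
      rw [hih, pv_ofList_cons_dup]
      congr 1
      refine List.map_congr_left (fun k _ => ?_)
      rcases eq_or_ne k v with hk | hk <;> simp [hk, List.count_cons] <;> omega
    · have hcv : cur < v := lt_of_le_of_ne (hs.1 v (by simp)) (fun h => hv h.symm)
      have hlt : ∀ k ∈ v :: rest, cur < k := by
        intro k hk
        rcases List.mem_cons.mp hk with hk | hk
        · exact hk ▸ hcv
        · exact lt_of_lt_of_le hcv ((List.pairwise_cons.mp hs.2).1 k hk)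
      have hd' : ∀ k ∈ v :: rest, (d.insert cur cnt).contains k = false := by
        intro k hk
        rw [PySem.Dict.contains_insert]
        have hkc : k ≠ cur := ne_of_gt (hlt k hk)
        simp [hkc, hd k (List.mem_cons_of_mem _ hk)]
      have hih := ih (d.insert cur cnt) v 1 hs.2 hd'
      simp only [List.foldl_cons]
      rw [if_neg hv, hih, PySem.Dict.items_insert_of_not_contains d cnt (hd cur (by simp)),
        pv_ofList_cons_of_not_mem cur (v :: rest) (fun h => lt_irrefl cur (hlt cur h))]
      have hcnt0 : (v :: rest).count cur = 0 :=
        List.count_eq_zero.mpr (fun h => lt_irrefl cur (hlt cur h))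
      simp only [List.map_cons, hcnt0, List.append_assoc, List.cons_append,
        List.nil_append, Nat.cast_zero, add_zero]
      congr 2
      refine List.map_congr_left (fun k hk => ?_)
      have hkm : k ∈ v :: rest := (PySem.Set.mem_ofList _ k).mp hk
      have hkc : k ≠ cur := ne_of_gt (hlt k hkm)
      rcases eq_or_ne k v with hkv | hkv <;> simp [hkc, hkv, hv, List.count_cons] <;> omega

-- B's result in closed form.
theorem pv_B_closed (x : List Int) :
    countdice_alt x = (PySem.Set.ofList (PySem.List.sorted x (fun k => k))).map
      (fun k => (k, ((PySem.List.sorted x (fun k => k)).count k : Int))) := by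
  unfold countdice_alt
  have hp : List.Pairwise (· ≤ ·) (PySem.List.sorted x (fun k => k)) := by
    simpa using PySem.List.sorted_pairwise x (fun k => k)
  rcases hs : PySem.List.sorted x (fun k => k) with _ | ⟨cur0, rest⟩
  · simp [PySem.Dict.empty, PySem.Set.ofList_nil]
  · rw [hs] at hp
    simp only []
    rw [pv_B_loop rest PySem.Dict.empty cur0 1 hp
      (fun k _ => PySem.Dict.contains_empty k)]
    have hemp : (PySem.Dict.empty : PySem.Dict Int Int).items = [] := rfl
    rw [hemp, List.nil_append]
    refine List.map_congr_left (fun k _ => ?_)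
    rcases eq_or_ne k cur0 with hk | hk <;> simp [hk, List.count_cons] <;> omega

-- sorting the set of x = the set of sorted x.
theorem pv_sorted_set (x : List Int) :
    PySem.List.sorted (PySem.Set.ofList x) (fun k => k)
      = PySem.Set.ofList (PySem.List.sorted x (fun k => k)) := by
  apply PySem.List.sorted_eq_of_perm_of_pairwise_lt
  · apply List.perm_of_nodup_nodup_toFinset_eq
      (PySem.Set.nodup_ofList _) (PySem.Set.nodup_ofList _)
    ext k
    simp only [List.mem_toFinset, PySem.Set.mem_ofList]
    exact ⟨fun h => (PySem.List.sorted_perm x (fun k => k) false).symm.mem_iff.mpr h,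
      fun h => (PySem.List.sorted_perm x (fun k => k) false).mem_iff.mpr h⟩
  · have hsub : (PySem.Set.ofList (PySem.List.sorted x (fun k => k))).Sublist
        (PySem.List.sorted x (fun k => k)) := by
      rw [PySem.Set.ofList_eq_foldl]
      simpa using pv_foldl_add_sublist (PySem.List.sorted x (fun k => k)) []
    have hle : List.Pairwise (· ≤ ·) (PySem.Set.ofList (PySem.List.sorted x (fun k => k))) :=
      (by simpa using PySem.List.sorted_pairwise x (fun k => k) : List.Pairwise (· ≤ ·) _).sublist hsub
    exact (hle.and (PySem.Set.nodup_ofList _)).imp (fun hab => lt_of_le_of_ne hab.1 hab.2)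

-- ===== VERDICT (by name: the statement is the Claim_ definition above) =====
theorem countdice_spec : Claim_equal_countdice := by
  intro x _
  unfold Spec_countdice
  rw [pv_A_closed, pv_B_closed, pv_sorted_set]
  exact List.map_congr_left (fun k _ => by
    rw [(PySem.List.sorted_perm x (fun k => k) false).count_eq])
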